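-- pv_equiv track=rewrite | github.com/Martin8520/Python_Projects | Practice/general_practice/len_of_longest_subarray_with_most_k.py | longestGoodSubarray
-- ===== SOURCE A (Python) =====
-- def longestGoodSubarray(nums, k):
--     freq = {}
--     left = 0
--     max_length = 0
--
--     for right in range(len(nums)):
--         if nums[right] in freq:
--             freq[nums[right]] += 1
--         else:
--             freq[nums[right]] = 1
--
--         while any(value > k for value in freq.values()):
--             freq[nums[left]] -= 1
--             if freq[nums[left]] == 0:
--                 del freq[nums[left]]
--             left += 1
--
--         max_length = max(max_length, right - left + 1)
--
--     return max_length
-- ===== SOURCE B (Python) =====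
-- def longestGoodSubarray(nums, k):
--     # No window is valid when k <= 0 (any nonempty window has some count >= 1 > k).
--     if k <= 0:
--         return 0
--     occ = {}          # value -> list of its occurrence indices so far, increasing
--     left = 0
--     best = 0
--     for right, x in enumerate(nums):
--         lst = occ.setdefault(x, [])
--         lst.append(right)
--         if len(lst) > k:
--             # the window must start after the (k+1)-th most recent occurrence of x
--             cut = lst[len(lst) - 1 - k] + 1
--             if cut > left:
--                 left = cut
--         if right - left + 1 > best:
--             best = right - left + 1
--     return best
-- ===== Notes on version B (the rewrite author's own statement) =====
-- stated objective: faster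
-- what changed: B abandons A's shrink-by-decrement frequency window entirely: it keeps per-value occurrence-index lists and, when a value reaches k+1 occurrences, jumps the window start directly past that value's (k+1)-th most recent occurrence (left = max(left, occ[x][-k-1]+1)), with no inner while loop, no count decrements and no scan of the frequency table; k<=0 is answered 0 up front.
import Mathlib
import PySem

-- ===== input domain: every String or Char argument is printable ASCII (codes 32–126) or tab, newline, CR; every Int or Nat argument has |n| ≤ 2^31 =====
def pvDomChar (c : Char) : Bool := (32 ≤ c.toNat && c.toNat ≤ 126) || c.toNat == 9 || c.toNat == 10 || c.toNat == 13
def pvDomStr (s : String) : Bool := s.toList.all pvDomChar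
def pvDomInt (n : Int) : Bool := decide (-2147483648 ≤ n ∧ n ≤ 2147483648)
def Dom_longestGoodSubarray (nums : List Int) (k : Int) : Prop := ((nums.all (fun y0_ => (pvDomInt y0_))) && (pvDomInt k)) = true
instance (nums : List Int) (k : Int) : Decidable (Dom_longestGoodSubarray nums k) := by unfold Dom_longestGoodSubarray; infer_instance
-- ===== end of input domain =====

-- B replaces A's shrink-by-decrement frequency window by per-value occurrence-index
-- lists: the window start jumps directly past the (k+1)-th most recent occurrence of
-- the element just added (no inner while loop); proved to return the same value.

-- ===== PORT A =====
-- inner `while any(value > k for value in freq.values()): …` loop of A; fuel only makes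
-- the recursion total (the loop runs at most len(nums) times per call, so fuel
-- len(nums)+1 is never exhausted); nums[left] is always in range here, so pyGetD is exact
def aShrink (nums : List Int) (k : Int) : Nat → PySem.Dict Int Int → Int → PySem.Dict Int Int × Int
  | 0, freq, left => (freq, left)
  | fuel + 1, freq, left =>
    if freq.values.any (fun v => decide (k < v)) then
      let y := PySem.List.pyGetD nums left 0
      let freq' := freq.modify y 0 (· - 1)
      let freq'' := if freq'.getD y 0 == 0 then freq'.erase y else freq'
      aShrink nums k fuel freq'' (left + 1)
    else (freq, left)

-- one iteration of `for right in range(len(nums))`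
def aStep (nums : List Int) (k : Int) (st : PySem.Dict Int Int × Int × Int) (right : Int) :
    PySem.Dict Int Int × Int × Int :=
  let x := PySem.List.pyGetD nums right 0
  let freq := if st.1.contains x then st.1.modify x 0 (· + 1) else st.1.insert x 1
  let r := aShrink nums k (nums.length + 1) freq st.2.1
  (r.1, r.2, max st.2.2 (right - r.2 + 1))

def longestGoodSubarray (nums : List Int) (k : Int) : Int :=
  ((PySem.List.pyRange 0 (nums.length : Int)).foldl (aStep nums k)
    (PySem.Dict.empty, 0, 0)).2.2

-- ===== PORT B =====
-- one iteration of `for right, x in enumerate(nums)`; occ maps a value to the list of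
-- its occurrence indices so far; lst[len(lst)-1-k] is always in range here (len(lst) > k ≥ 1),
-- so pyGetD is exact
def bStep (k : Int) (st : PySem.Dict Int (List Int) × Int × Int) (p : Int × Int) :
    PySem.Dict Int (List Int) × Int × Int :=
  let lst := st.1.getD p.2 [] ++ [p.1]        -- occ.setdefault(x, []); lst.append(right)
  let occ := st.1.insert p.2 lst
  let left :=
    if k < (lst.length : Int) then            -- len(lst) > k
      let cut := PySem.List.pyGetD lst ((lst.length : Int) - 1 - k) 0 + 1
      if st.2.1 < cut then cut else st.2.1
    else st.2.1
  let best := if st.2.2 < p.1 - left + 1 then p.1 - left + 1 else st.2.2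
  (occ, left, best)

def longestGoodSubarray_alt (nums : List Int) (k : Int) : Int :=
  if k ≤ 0 then 0
  else ((PySem.List.enumerate nums).foldl (bStep k) (PySem.Dict.empty, 0, 0)).2.2

-- ===== PRECONDITION & SPEC =====
def Spec_longestGoodSubarray (nums : List Int) (k : Int) (out : Int) : Prop := out = longestGoodSubarray_alt nums k
instance (nums : List Int) (k : Int) (out : Int) : Decidable (Spec_longestGoodSubarray nums k out) := by unfold Spec_longestGoodSubarray; infer_instance

-- ===== CLAIM (what is proved, stated in full; the proofs are below) =====
def Claim_equal_longestGoodSubarray : Prop := ∀ (nums : List Int) (k : Int), Dom_longestGoodSubarray nums k → Spec_longestGoodSubarray nums k (longestGoodSubarray nums k)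

-- ===== LEMMAS AND PROOFS =====

-- count of v in the window nums[l..m) (as an Int)
def winCnt (nums : List Int) (m : Nat) (l : Int) (v : Int) : Int :=
  (((nums.take m).drop l.toNat).count v : Int)

-- "every value occurs at most max k 0 times in the window [l..m)" — exactly the
-- condition under which A's inner while loop stops (stored counts are positive)
def GoodA (nums : List Int) (k : Int) (m : Nat) (l : Int) : Prop :=
  ∀ v, winCnt nums m l v ≤ max k 0

-- list of the indices i < m with nums[i] = v, increasing
def occIdx (nums : List Int) (m : Nat) (x : Int) : List Int :=
  ((List.range m).filter (fun i => decide (nums.getD i 0 = x))).map (fun i => Int.ofNat i)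

theorem winCnt_nonneg (nums : List Int) (m : Nat) (l v : Int) : 0 ≤ winCnt nums m l v := by
  simp [winCnt]

theorem winCnt_empty (nums : List Int) (m : Nat) (l : Int) (hlm : (m : Int) ≤ l) (v : Int) :
    winCnt nums m l v = 0 := by
  have : (nums.take m).length ≤ l.toNat := by simp; omega
  simp [winCnt, List.drop_eq_nil_of_le this]

theorem winCnt_antitone (nums : List Int) (m : Nat) (t t' v : Int) (h0 : 0 ≤ t) (h : t ≤ t') :
    winCnt nums m t' v ≤ winCnt nums m t v := by
  simp only [winCnt]
  have hdd : ((nums.take m).drop t'.toNat) = ((nums.take m).drop t.toNat).drop (t'.toNat - t.toNat) := by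
    rw [List.drop_drop]; congr 1; omega
  rw [hdd]
  have hs : (((nums.take m).drop t.toNat).drop (t'.toNat - t.toNat)).Sublist
      ((nums.take m).drop t.toNat) := List.drop_sublist _ _
  exact_mod_cast hs.count_le v

theorem get?_erase (d : PySem.Dict Int Int) (k k' : Int) :
    (d.erase k).get? k' = if k' = k then none else d.get? k' := by
  obtain ⟨items⟩ := d
  induction items with
  | nil => simp [PySem.Dict.erase, PySem.Dict.get?]
  | cons p rest ih =>
    simp only [PySem.Dict.erase, PySem.Dict.get?, List.filter_cons] at *
    by_cases h1 : p.1 = k <;> by_cases h2 : p.1 = k' <;>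
      simp_all

theorem keys_erase_sublist (d : PySem.Dict Int Int) (k : Int) :
    (d.erase k).keys.Sublist d.keys :=
  List.Sublist.map _ (List.filter_sublist)

theorem nodup_keys_erase (d : PySem.Dict Int Int) (k : Int)
    (h : d.keys.Nodup) : (d.erase k).keys.Nodup :=
  (keys_erase_sublist d k).nodup h

theorem getD_erase (d : PySem.Dict Int Int) (y v d0 : Int) :
    (d.erase y).getD v d0 = if v = y then d0 else d.getD v d0 := by
  rw [PySem.Dict.getD_eq_get?_getD, get?_erase]
  split
  · rfl
  · rw [PySem.Dict.getD_eq_get?_getD]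

theorem contains_erase (d : PySem.Dict Int Int) (y v : Int) :
    (d.erase y).contains v = if v = y then false else d.contains v := by
  rw [PySem.Dict.contains_eq_isSome_get?, get?_erase]
  split
  · rfl
  · rw [PySem.Dict.contains_eq_isSome_get?]

theorem win_cons (nums : List Int) (m : Nat) (l : Int) (h0 : 0 ≤ l) (hlm : l < (m : Int))
    (hm : m ≤ nums.length) :
    (nums.take m).drop l.toNat =
      nums[l.toNat]'(by omega) :: (nums.take m).drop (l.toNat + 1) := by
  have h1 : l.toNat < (nums.take m).length := by simp; omega
  rw [List.drop_eq_getElem_cons h1, List.getElem_take]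

theorem winCnt_succ_left (nums : List Int) (m : Nat) (l : Int) (h0 : 0 ≤ l)
    (hlm : l < (m : Int)) (hm : m ≤ nums.length) (v : Int) :
    winCnt nums m (l + 1) v =
      winCnt nums m l v - (if v = nums[l.toNat]'(by omega) then 1 else 0) := by
  have ht : (l + 1).toNat = l.toNat + 1 := by omega
  simp only [winCnt, ht]
  rw [win_cons nums m l h0 hlm hm, List.count_cons]
  by_cases h : nums[l.toNat]'(by omega) = v
  · simp [h]
  · simp [h, beq_iff_eq, Ne.symm h]

theorem winCnt_head_pos (nums : List Int) (m : Nat) (l : Int) (h0 : 0 ≤ l)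
    (hlm : l < (m : Int)) (hm : m ≤ nums.length) :
    1 ≤ winCnt nums m l (nums[l.toNat]'(by omega)) := by
  simp only [winCnt]
  rw [win_cons nums m l h0 hlm hm, List.count_cons]
  simp

theorem winCnt_succ_right (nums : List Int) (m : Nat) (l : Int) (h0 : 0 ≤ l)
    (hlm : l ≤ (m : Int)) (hm : m < nums.length) (v : Int) :
    winCnt nums (m + 1) l v =
      winCnt nums m l v + (if v = nums[m]'(hm) then 1 else 0) := by
  have hlt : l.toNat ≤ (nums.take m).length := by simp; omega
  simp only [winCnt]
  rw [List.take_add_one, List.getElem?_eq_getElem hm]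
  simp only [Option.toList_some]
  rw [List.drop_append_of_le_length hlt, List.count_append]
  by_cases h : v = nums[m]'hm
  · simp [h, beq_iff_eq]
  · simp [List.count_singleton, beq_iff_eq, h, Ne.symm h]

theorem winCnt_le_succ (nums : List Int) (m : Nat) (hm : m < nums.length) (t v : Int)
    (h0 : 0 ≤ t) : winCnt nums m t v ≤ winCnt nums (m + 1) t v := by
  by_cases ht : t ≤ (m : Int)
  · rw [winCnt_succ_right nums m t h0 ht hm v]
    split <;> omega
  · rw [winCnt_empty nums m t (by omega) v]
    exact winCnt_nonneg nums (m + 1) t v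

theorem stored_val (freq : PySem.Dict Int Int) (a val : Int)
    (hmem : (a, val) ∈ freq.items) (hnod : freq.keys.Nodup) :
    freq.getD a 0 = val ∧ freq.contains a = true := by
  have h1 := PySem.Dict.get?_of_mem_items freq hmem hnod
  constructor
  · rw [PySem.Dict.getD_eq_get?_getD, h1]; rfl
  · rw [PySem.Dict.contains_eq_isSome_get?, h1]; rfl

theorem getD_ne_zero_stored (freq : PySem.Dict Int Int) (a : Int)
    (h : freq.getD a 0 ≠ 0) : ∃ val, freq.get? a = some val ∧ val = freq.getD a 0 := by
  cases hg : freq.get? a with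
  | none => rw [PySem.Dict.getD_eq_get?_getD, hg] at h; simp at h
  | some val => exact ⟨val, rfl, by rw [PySem.Dict.getD_eq_get?_getD, hg]; rfl⟩

-- A's while-condition holds iff the window is not good
theorem anyIff (nums : List Int) (k : Int) (m : Nat) (l : Int) (freq : PySem.Dict Int Int)
    (hA : ∀ v, freq.getD v 0 = winCnt nums m l v)
    (hpos : ∀ v, freq.contains v = true → freq.getD v 0 ≠ 0)
    (hnod : freq.keys.Nodup) :
    (freq.values.any (fun v => decide (k < v)) = true) ↔ ¬ GoodA nums k m l := by
  constructor
  · intro h hG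
    rw [List.any_eq_true] at h
    obtain ⟨val, hval, hk⟩ := h
    simp only [decide_eq_true_eq] at hk
    simp only [PySem.Dict.values, List.mem_map] at hval
    obtain ⟨⟨a, val2⟩, hmem, hsnd⟩ := hval
    simp only at hsnd
    subst hsnd
    obtain ⟨hgd, hcont⟩ := stored_val freq a val2 hmem hnod
    have hcnt : winCnt nums m l a = val2 := by rw [← hA a, hgd]
    have hvalnz : val2 ≠ 0 := by rw [← hgd]; exact hpos a hcont
    have := hG a
    have := winCnt_nonneg nums m l a
    omega
  · intro hG
    rw [List.any_eq_true]
    unfold GoodA at hG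
    push_neg at hG
    obtain ⟨v, hv⟩ := hG
    have hnz : freq.getD v 0 ≠ 0 := by rw [hA v]; omega
    obtain ⟨val, hg, hvv⟩ := getD_ne_zero_stored freq v hnz
    refine ⟨val, ?_, ?_⟩
    · simp only [PySem.Dict.values, List.mem_map]
      exact ⟨(v, val), PySem.Dict.mem_items_of_get?_eq_some freq hg, rfl⟩
    · simp only [decide_eq_true_eq]
      rw [hvv, hA v]
      omega

theorem a_update (nums : List Int) (m : Nat) (l : Int) (freq : PySem.Dict Int Int)
    (h0 : 0 ≤ l) (hlm : l + 1 ≤ (m : Int)) (hm : m ≤ nums.length)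
    (hA : ∀ v, freq.getD v 0 = winCnt nums m l v)
    (hpos : ∀ v, freq.contains v = true → freq.getD v 0 ≠ 0)
    (hnod : freq.keys.Nodup) :
    ∀ y, y = nums[l.toNat]'(by omega) →
    ∀ freq', freq' = freq.modify y 0 (· - 1) →
    ∀ freq'', freq'' = (if freq'.getD y 0 == 0 then freq'.erase y else freq') →
    (∀ v, freq''.getD v 0 = winCnt nums m (l + 1) v) ∧
    (∀ v, freq''.contains v = true → freq''.getD v 0 ≠ 0) ∧
    freq''.keys.Nodup := by
  intro y hy freq' hf' freq'' hf''
  have hA' : ∀ v, freq'.getD v 0 = winCnt nums m (l + 1) v := by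
    intro v
    rw [hf', PySem.Dict.getD_modify, winCnt_succ_left nums m l h0 (by omega) hm v, ← hy]
    split <;> simp_all [hA]
  have hgd : ∀ v, freq''.getD v 0 = freq'.getD v 0 := by
    intro v
    rw [hf'']
    split
    · rename_i hz
      simp only [beq_iff_eq] at hz
      rw [getD_erase]
      split
      · rename_i hvy; rw [hvy, hz]
      · rfl
    · rfl
  have hnod' : freq'.keys.Nodup := by
    rw [hf', PySem.Dict.keys_modify]
    exact PySem.Dict.nodup_keys_insert _ _ _ hnod
  refine ⟨fun v => by rw [hgd v, hA' v], ?_, ?_⟩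
  · intro v hc
    rw [hgd v]
    by_cases hvy : v = y
    · subst hvy
      rw [hf''] at hc
      split at hc
      · rw [contains_erase] at hc; simp at hc
      · rename_i hz; simp only [beq_iff_eq] at hz; exact fun h => hz h
    · have hc' : freq'.contains v = true := by
        rw [hf''] at hc
        split at hc
        · rwa [contains_erase, if_neg hvy] at hc
        · exact hc
      have hcf : freq.contains v = true := by
        rw [hf', PySem.Dict.contains_modify] at hc'
        simpa [hvy] using hc'
      have : freq'.getD v 0 = freq.getD v 0 := by
        rw [hf', PySem.Dict.getD_modify, if_neg hvy]
      rw [this]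
      exact hpos v hcf
  · rw [hf'']
    split
    · exact nodup_keys_erase _ _ hnod'
    · exact hnod'

-- A's freq update for the element entering on the right keeps the invariants
theorem a_add (nums : List Int) (m : Nat) (hmlt : m < nums.length) (l : Int)
    (h0 : 0 ≤ l) (hlm : l ≤ (m : Int)) (freq : PySem.Dict Int Int)
    (hA : ∀ v, freq.getD v 0 = winCnt nums m l v)
    (hpos : ∀ v, freq.contains v = true → freq.getD v 0 ≠ 0)
    (hnod : freq.keys.Nodup) :
    ∀ x, x = nums[m]'hmlt →
    (∀ v, (if freq.contains x then freq.modify x 0 (· + 1) else freq.insert x 1).getD v 0 =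
        winCnt nums (m + 1) l v) ∧
    (∀ v, (if freq.contains x then freq.modify x 0 (· + 1) else freq.insert x 1).contains v = true →
        (if freq.contains x then freq.modify x 0 (· + 1) else freq.insert x 1).getD v 0 ≠ 0) ∧
    (if freq.contains x then freq.modify x 0 (· + 1) else freq.insert x 1).keys.Nodup := by
  intro x hx
  have hAadd : ∀ v, (if freq.contains x then freq.modify x 0 (· + 1) else freq.insert x 1).getD v 0 =
      winCnt nums (m + 1) l v := by
    intro v
    rw [winCnt_succ_right nums m l h0 hlm hmlt v, ← hx]
    split
    · rename_i hc
      rw [PySem.Dict.getD_modify]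
      split <;> simp_all [hA]
    · rename_i hc
      rw [PySem.Dict.getD_insert]
      split
      · rename_i hvx
        have : freq.getD v 0 = 0 := by
          rw [PySem.Dict.getD_eq_get?_getD]
          cases hg : freq.get? v with
          | none => rfl
          | some w =>
            have : freq.contains v = true := by
              rw [PySem.Dict.contains_eq_isSome_get?, hg]; rfl
            rw [hvx] at this; exact absurd this (by simp [hc])
        rw [← hA v, this]; omega
      · rename_i hvx; simp [hA v, hvx]
  refine ⟨hAadd, ?_, ?_⟩
  · intro v hcv
    rw [hAadd v]
    by_cases hvx : v = x
    · rw [hvx, winCnt_succ_right nums m l h0 hlm hmlt x, ← hx]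
      have := winCnt_nonneg nums m l x
      simp; omega
    · rw [winCnt_succ_right nums m l h0 hlm hmlt v, ← hx, if_neg hvx, add_zero, ← hA v]
      apply hpos v
      split at hcv
      · rw [PySem.Dict.contains_modify] at hcv
        simpa [hvx] using hcv
      · rw [PySem.Dict.contains_insert] at hcv
        simpa [hvx] using hcv
  · split
    · rw [PySem.Dict.keys_modify]; exact PySem.Dict.nodup_keys_insert _ _ _ hnod
    · exact PySem.Dict.nodup_keys_insert _ _ _ hnod

-- A's inner loop stops at the first good window start ≥ left
theorem aShrink_min (nums : List Int) (k : Int) (m : Nat) (hm : m ≤ nums.length) :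
    ∀ (fuel : Nat) (freq : PySem.Dict Int Int) (l : Int),
    (m : Int) - l ≤ (fuel : Int) → 0 ≤ l → l ≤ (m : Int) →
    (∀ v, freq.getD v 0 = winCnt nums m l v) →
    (∀ v, freq.contains v = true → freq.getD v 0 ≠ 0) →
    freq.keys.Nodup →
    ∃ freq' l',
      aShrink nums k fuel freq l = (freq', l') ∧
      l ≤ l' ∧ l' ≤ (m : Int) ∧
      (∀ v, freq'.getD v 0 = winCnt nums m l' v) ∧
      (∀ v, freq'.contains v = true → freq'.getD v 0 ≠ 0) ∧
      freq'.keys.Nodup ∧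
      GoodA nums k m l' ∧
      (∀ t, l ≤ t → t < l' → ¬ GoodA nums k m t) := by
  intro fuel
  induction fuel with
  | zero =>
    intro freq l hfuel h0 hlm hA hpos hnod
    have hlm' : l = (m : Int) := by push_cast at hfuel ⊢; omega
    refine ⟨freq, l, rfl, le_refl l, hlm, hA, hpos, hnod, ?_, by omega⟩
    intro v
    rw [winCnt_empty nums m l (by omega) v]
    exact le_max_right k 0
  | succ fuel ih =>
    intro freq l hfuel h0 hlm hA hpos hnod
    have hiff := anyIff nums k m l freq hA hpos hnod
    by_cases hg : GoodA nums k m l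
    · have hcb : freq.values.any (fun v => decide (k < v)) = false := by
        rw [← Bool.not_eq_true]
        exact fun h => (hiff.mp h) hg
      refine ⟨freq, l, ?_, le_refl l, hlm, hA, hpos, hnod, hg, by omega⟩
      rw [aShrink, if_neg (by simp [hcb])]
    · have hcb : freq.values.any (fun v => decide (k < v)) = true := hiff.mpr hg
      have hlm2 : l + 1 ≤ (m : Int) := by
        by_contra hc
        apply hg
        intro v
        rw [winCnt_empty nums m l (by omega) v]
        exact le_max_right k 0
      have hget : PySem.List.pyGetD nums l 0 = nums[l.toNat]'(by omega) :=
        PySem.List.pyGetD_eq_getElem nums 0 h0 (by omega)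
      obtain ⟨hA', hpos', hnod'⟩ :=
        a_update nums m l freq h0 hlm2 hm hA hpos hnod
          (PySem.List.pyGetD nums l 0) hget _ rfl _ rfl
      obtain ⟨freq', l', hE, h1, h2, h3, h4, h5, h6, h7⟩ :=
        ih _ (l + 1) (by push_cast at hfuel ⊢; omega) (by omega) hlm2 hA' hpos' hnod'
      refine ⟨freq', l', ?_, by omega, h2, h3, h4, h5, h6, ?_⟩
      · rw [aShrink, if_pos hcb]
        exact hE
      · intro t ht1 ht2
        rcases eq_or_lt_of_le ht1 with h | h
        · rw [← h]; exact hg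
        · exact h7 t (by omega) ht2

-- two global minima of the same predicate coincide
theorem min_unique (P : Int → Prop) (a b : Int) (ha0 : 0 ≤ a) (hb0 : 0 ≤ b)
    (hPa : P a) (hPb : P b)
    (hma : ∀ t, 0 ≤ t → t < a → ¬ P t) (hmb : ∀ t, 0 ≤ t → t < b → ¬ P t) : a = b := by
  rcases lt_trichotomy a b with h | h | h
  · exact absurd hPa (hmb a ha0 h)
  · exact h
  · exact absurd hPb (hma b hb0 h)

theorem if_lt_eq_max (a b : Int) : (if a < b then b else a) = max a b := by
  rw [max_def]
  split_ifs <;> omega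

-- ===== occurrence-index lemmas for B =====

theorem occIdx_succ (nums : List Int) (m : Nat) (x : Int) :
    occIdx nums (m + 1) x =
      occIdx nums m x ++ (if nums.getD m 0 = x then [(m : Int)] else []) := by
  by_cases h : nums.getD m 0 = x <;>
    rw [List.getD_eq_getElem?_getD] at h <;>
    simp [occIdx, List.range_succ, List.filter_append, h, List.getD_eq_getElem?_getD]

theorem occIdx_mem (nums : List Int) (m : Nat) (x : Int) :
    ∀ p ∈ occIdx nums m x, 0 ≤ p ∧ p < (m : Int) := by
  intro p hp
  unfold occIdx at hp
  obtain ⟨i, hi, rfl⟩ := List.mem_map.mp hp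
  have h1 := List.mem_range.mp (List.mem_filter.mp hi).1
  exact ⟨Int.ofNat_nonneg i, Int.ofNat_lt.mpr h1⟩

theorem occIdx_pairwise (nums : List Int) (m : Nat) (x : Int) :
    (occIdx nums m x).Pairwise (· < ·) := by
  unfold occIdx
  refine List.Pairwise.map _ (fun a b h => ?_)
    (List.Pairwise.sublist List.filter_sublist List.pairwise_lt_range)
  exact Int.ofNat_lt.mpr h

theorem occIdx_countP (nums : List Int) (x : Int) :
    ∀ (m : Nat), m ≤ nums.length → ∀ (l : Int), 0 ≤ l →
    (((occIdx nums m x).countP (fun p => decide (l ≤ p)) : Nat) : Int) = winCnt nums m l x := by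
  intro m
  induction m with
  | zero =>
    intro _ l h0
    simp [occIdx, winCnt]
  | succ m ih =>
    intro hm1 l h0
    have hmlt : m < nums.length := by omega
    have hnd : nums.getD m 0 = nums[m]'hmlt := List.getD_eq_getElem nums 0 hmlt
    rw [occIdx_succ, List.countP_append]
    by_cases hl : l ≤ (m : Int)
    · rw [Nat.cast_add, ih (by omega) l h0, winCnt_succ_right nums m l h0 hl hmlt x]
      by_cases hx : nums[m]'hmlt = x
      · rw [hnd, if_pos hx, if_pos (Eq.symm hx)]
        simp [List.countP_cons, decide_eq_true_eq, hl]
      · rw [hnd, if_neg hx, if_neg (fun h => hx (Eq.symm h))]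
        simp
    · rw [winCnt_empty nums (m + 1) l (by omega) x]
      have h1 : (occIdx nums m x).countP (fun p => decide (l ≤ p)) = 0 := by
        rw [List.countP_eq_zero]
        intro p hp
        have := occIdx_mem nums m x p hp
        simp only [decide_eq_true_eq]
        omega
      have h2 : ((if nums.getD m 0 = x then [(m : Int)] else []).countP
          (fun p => decide (l ≤ p))) = 0 := by
        split <;> simp [List.countP_cons, decide_eq_true_eq] <;> omega
      rw [h1, h2]
      rfl

theorem occIdx_length (nums : List Int) (x : Int) (m : Nat) (hm : m ≤ nums.length) :
    (((occIdx nums m x).length : Nat) : Int) = winCnt nums m 0 x := by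
  rw [← occIdx_countP nums x m hm 0 (le_refl 0)]
  congr 1
  symm
  rw [List.countP_eq_length]
  intro p hp
  have := occIdx_mem nums m x p hp
  simp only [decide_eq_true_eq]
  omega

-- in a strictly increasing list, the elements ≥ L[i] are exactly the last length-i ones
theorem countP_sorted_ge (L : List Int) (hL : L.Pairwise (· < ·)) (i : Nat) (hi : i < L.length) :
    L.countP (fun p => decide (L[i] ≤ p)) = L.length - i ∧
    L.countP (fun p => decide (L[i] + 1 ≤ p)) = L.length - (i + 1) := by
  have hpg := List.pairwise_iff_getElem.mp hL
  have hdecomp : L = L.take i ++ L[i] :: L.drop (i + 1) := by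
    conv_lhs => rw [← List.take_append_drop i L]
    rw [List.drop_eq_getElem_cons hi]
  have hlt : ∀ a ∈ L.take i, a < L[i] := by
    intro a ha
    rw [List.mem_iff_getElem] at ha
    obtain ⟨j, hj, rfl⟩ := ha
    have hj' : j < i := by simp at hj; omega
    rw [List.getElem_take]
    exact hpg j i (by omega) hi hj'
  have hgt : ∀ a ∈ L.drop (i + 1), L[i] < a := by
    intro a ha
    rw [List.mem_iff_getElem] at ha
    obtain ⟨j, hj, rfl⟩ := ha
    have hj' : i + 1 + j < L.length := by simp at hj; omega
    rw [List.getElem_drop]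
    exact hpg i (i + 1 + j) hi hj' (by omega)
  have hlen : (L.drop (i + 1)).length = L.length - (i + 1) := by simp
  have key : ∀ a : Int, a = L[i]'hi →
      (L.countP (fun p => decide (a ≤ p)) = L.length - i ∧
       L.countP (fun p => decide (a + 1 ≤ p)) = L.length - (i + 1)) := by
    intro a ha
    have hlt' : ∀ b ∈ L.take i, b < a := fun b hb => by rw [ha]; exact hlt b hb
    have hgt' : ∀ b ∈ L.drop (i + 1), a < b := fun b hb => by rw [ha]; exact hgt b hb
    have h1 : (L.take i).countP (fun p => decide (a ≤ p)) = 0 := by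
      rw [List.countP_eq_zero]
      intro b hb
      have := hlt' b hb
      simp only [decide_eq_true_eq]
      omega
    have h1' : (L.take i).countP (fun p => decide (a + 1 ≤ p)) = 0 := by
      rw [List.countP_eq_zero]
      intro b hb
      have := hlt' b hb
      simp only [decide_eq_true_eq]
      omega
    have h2 : (L.drop (i + 1)).countP (fun p => decide (a ≤ p)) = L.length - (i + 1) := by
      rw [← hlen, List.countP_eq_length]
      intro b hb
      have := hgt' b hb
      simp only [decide_eq_true_eq]
      omega
    have h2' : (L.drop (i + 1)).countP (fun p => decide (a + 1 ≤ p)) = L.length - (i + 1) := by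
      rw [← hlen, List.countP_eq_length]
      intro b hb
      have := hgt' b hb
      simp only [decide_eq_true_eq]
      omega
    constructor
    · conv_lhs => rw [hdecomp]
      rw [List.countP_append, List.countP_cons, h1, h2, ← ha]
      simp only [decide_eq_true_eq]
      rw [if_pos (le_refl a)]
      omega
    · conv_lhs => rw [hdecomp]
      rw [List.countP_append, List.countP_cons, h1', h2', ← ha]
      simp only [decide_eq_true_eq]
      rw [if_neg (by omega)]
      omega
  exact key _ rfl

-- B's jump formula produces exactly the minimal good window start for the new window
theorem b_left_min (nums : List Int) (k : Int) (hk : 0 < k) (m : Nat) (hm : m < nums.length)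
    (l : Int) (h0 : 0 ≤ l) (hlm : l ≤ (m : Int))
    (hGl : GoodA nums k m l)
    (hmin : ∀ t, 0 ≤ t → t < l → ¬ GoodA nums k m t)
    (x : Int) (hx : x = nums.getD m 0)
    (lst : List Int) (hlst : lst = occIdx nums (m + 1) x)
    (left' : Int)
    (hleft : left' = (if k < (lst.length : Int) then
        (if l < PySem.List.pyGetD lst ((lst.length : Int) - 1 - k) 0 + 1 then
          PySem.List.pyGetD lst ((lst.length : Int) - 1 - k) 0 + 1 else l)
      else l)) :
    l ≤ left' ∧ left' ≤ ((m + 1 : Nat) : Int) ∧ GoodA nums k (m + 1) left' ∧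
    (∀ t, 0 ≤ t → t < left' → ¬ GoodA nums k (m + 1) t) := by
  have hmax : max k 0 = k := max_eq_left (by omega)
  have hm1 : m + 1 ≤ nums.length := by omega
  have hxm : x = nums[m]'hm := by rw [hx]; exact List.getD_eq_getElem nums 0 hm
  -- counts of values other than x do not change when the window gains nums[m]
  have hother : ∀ t, 0 ≤ t → ∀ v, v ≠ x → winCnt nums (m + 1) t v = winCnt nums m t v := by
    intro t ht v hv
    by_cases htm : t ≤ (m : Int)
    · rw [winCnt_succ_right nums m t ht htm hm v, if_neg (by rw [← hxm]; exact hv), add_zero]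
    · rw [winCnt_empty nums (m + 1) t (by omega) v, winCnt_empty nums m t (by omega) v]
  have hlift : ∀ t, 0 ≤ t → t < l → ¬ GoodA nums k (m + 1) t := by
    intro t ht htl hG
    apply hmin t ht htl
    intro v
    exact le_trans (winCnt_le_succ nums m hm t v ht) (hG v)
  have hlen : ((lst.length : Nat) : Int) = winCnt nums (m + 1) 0 x := by
    rw [hlst]; exact occIdx_length nums x (m + 1) hm1
  by_cases hkc : k < (lst.length : Int)
  · -- x now has more than k occurrences in nums[0..m+1)
    have hlk : (k.toNat : Int) = k := by omega
    have hpnlt : ((lst.length : Int) - 1 - k).toNat < lst.length := by omega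
    have hgetp : PySem.List.pyGetD lst ((lst.length : Int) - 1 - k) 0 =
        lst[((lst.length : Int) - 1 - k).toNat]'hpnlt :=
      PySem.List.pyGetD_eq_getElem lst 0 (by omega) (by omega)
    have hpb := occIdx_mem nums (m + 1) x
      (lst[((lst.length : Int) - 1 - k).toNat]'hpnlt) (hlst ▸ List.getElem_mem _)
    obtain ⟨hcge, hcgt⟩ := countP_sorted_ge lst (hlst ▸ occIdx_pairwise nums (m + 1) x)
      (((lst.length : Int) - 1 - k).toNat) hpnlt
    have hWp : winCnt nums (m + 1) (lst[((lst.length : Int) - 1 - k).toNat]'hpnlt) x = k + 1 := by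
      rw [← occIdx_countP nums x (m + 1) hm1 _ hpb.1, ← hlst, hcge]
      omega
    have hWp1 : winCnt nums (m + 1) (lst[((lst.length : Int) - 1 - k).toNat]'hpnlt + 1) x = k := by
      rw [← occIdx_countP nums x (m + 1) hm1 _ (by omega : (0:Int) ≤ lst[((lst.length : Int) - 1 - k).toNat]'hpnlt + 1), ← hlst, hcgt]
      omega
    set p : Int := lst[((lst.length : Int) - 1 - k).toNat]'hpnlt with hp
    have hleft2 : left' = if l < p + 1 then p + 1 else l := by
      rw [hleft, if_pos hkc, hgetp]
    by_cases hcl : l < p + 1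
    · have hlf : left' = p + 1 := by rw [hleft2, if_pos hcl]
      rw [hlf]
      refine ⟨by omega, by push_cast; omega, ?_, ?_⟩
      · intro v
        rw [hmax]
        by_cases hv : v = x
        · rw [hv, hWp1]
        · rw [hother (p + 1) (by omega) v hv]
          have h1 := winCnt_antitone nums m l (p + 1) v h0 (by omega)
          have h2 := hGl v
          rw [hmax] at h2
          omega
      · intro t ht htp
        by_cases htl : t < l
        · exact hlift t ht htl
        · intro hG
          have h1 := winCnt_antitone nums (m + 1) t p x ht (by omega)
          have h2 := hG x
          rw [hmax] at h2
          omega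
    · have hlf : left' = l := by rw [hleft2, if_neg hcl]
      rw [hlf]
      refine ⟨le_refl l, by push_cast; omega, ?_, hlift⟩
      intro v
      rw [hmax]
      by_cases hv : v = x
      · rw [hv]
        have h1 := winCnt_antitone nums (m + 1) (p + 1) l x (by omega) (by omega)
        rw [hWp1] at h1
        exact h1
      · rw [hother l h0 v hv]
        have := hGl v
        rw [hmax] at this
        exact this
  · -- x has at most k occurrences: the old start is still minimal
    have hleft' : left' = l := by rw [hleft, if_neg hkc]
    rw [hleft']
    refine ⟨le_refl l, by push_cast; omega, ?_, hlift⟩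
    intro v
    rw [hmax]
    by_cases hv : v = x
    · rw [hv]
      calc winCnt nums (m + 1) l x ≤ winCnt nums (m + 1) 0 x :=
            winCnt_antitone nums (m + 1) 0 l x (le_refl 0) h0
        _ = (lst.length : Int) := hlen.symm
        _ ≤ k := by omega
    · rw [hother l h0 v hv]
      have := hGl v
      rw [hmax] at this
      exact this

-- lockstep outer induction for k > 0: after m iterations both folds carry the same
-- window start (the minimal good one) and the same best length
theorem outer_lockstep (nums : List Int) (k : Int) (hk : 0 < k) :
    ∀ (m : Nat), m ≤ nums.length →
    ∃ (freq : PySem.Dict Int Int) (occ : PySem.Dict Int (List Int)) (l best : Int),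
      ((PySem.List.pyRange 0 (m : Int)).foldl (aStep nums k) (PySem.Dict.empty, 0, 0)) = (freq, l, best) ∧
      ((PySem.List.enumerate (nums.take m)).foldl (bStep k) (PySem.Dict.empty, 0, 0)) = (occ, l, best) ∧
      0 ≤ l ∧ l ≤ (m : Int) ∧
      (∀ v, freq.getD v 0 = winCnt nums m l v) ∧
      (∀ v, freq.contains v = true → freq.getD v 0 ≠ 0) ∧
      freq.keys.Nodup ∧
      (∀ v, occ.getD v [] = occIdx nums m v) ∧
      GoodA nums k m l ∧
      (∀ t, 0 ≤ t → t < l → ¬ GoodA nums k m t) := by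
  intro m
  induction m with
  | zero =>
    intro _
    refine ⟨PySem.Dict.empty, PySem.Dict.empty, 0, 0, ?_, ?_, le_refl 0, le_refl 0,
      ?_, ?_, ?_, ?_, ?_, by omega⟩
    · simp [PySem.List.pyRange_zero_natCast]
    · simp [PySem.List.enumerate]
    · intro v
      rw [winCnt_empty nums 0 0 (by omega) v, PySem.Dict.getD_empty]
    · intro v h
      rw [PySem.Dict.contains_empty] at h
      exact absurd h (by simp)
    · simpa using PySem.Dict.nodup_keys_empty (κ := Int) (ν := Int)
    · intro v
      rw [PySem.Dict.getD_empty]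
      unfold occIdx
      simp
    · intro v
      rw [winCnt_empty nums 0 0 (by omega) v]
      exact le_max_right k 0
  | succ m ihm =>
    intro hm1
    have hm : m ≤ nums.length := by omega
    have hmlt : m < nums.length := by omega
    obtain ⟨freq, occ, l, best, hFA, hFB, h0, hlm, hA, hpos, hnod, hOcc, hG, hMin⟩ := ihm hm
    have hsplitA : PySem.List.pyRange 0 ((m + 1 : Nat) : Int) =
        PySem.List.pyRange 0 (m : Int) ++ [(m : Int)] := by
      push_cast
      exact PySem.List.pyRange_one_succ_right (by positivity)
    have htake : nums.take (m + 1) = nums.take m ++ [nums[m]'hmlt] := by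
      rw [List.take_add_one, List.getElem?_eq_getElem hmlt]; rfl
    have hsplitB : PySem.List.enumerate (nums.take (m + 1)) =
        PySem.List.enumerate (nums.take m) ++ [((m : Int), nums[m]'hmlt)] := by
      rw [htake, PySem.List.enumerate_append]
      simp [PySem.List.enumerate_cons, List.length_take, Nat.min_eq_left hm]
    set x : Int := nums[m]'hmlt with hx
    have hget : PySem.List.pyGetD nums (m : Int) 0 = x := by
      rw [PySem.List.pyGetD_eq_getElem nums 0 (by positivity) (by exact_mod_cast hmlt)]
      simp [hx]
    have hxg : x = nums.getD m 0 := by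
      rw [hx]; exact (List.getD_eq_getElem nums 0 hmlt).symm
    obtain ⟨hA1, hpos1, hnod1⟩ := a_add nums m hmlt l h0 hlm freq hA hpos hnod x hx
    obtain ⟨freq', l', hEA, hl1, hl2, hA', hpos', hnod', hG', hMin'⟩ :=
      aShrink_min nums k (m + 1) (by omega) (nums.length + 1) _ l
        (by push_cast; omega) h0 (by push_cast; omega) hA1 hpos1 hnod1
    have hMinG : ∀ t, 0 ≤ t → t < l' → ¬ GoodA nums k (m + 1) t := by
      intro t ht htl hGt
      by_cases htl2 : t < l
      · exact hMin t ht htl2 (fun v => le_trans (winCnt_le_succ nums m hmlt t v ht) (hGt v))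
      · exact hMin' t (by omega) htl hGt
    set lst : List Int := occ.getD x [] ++ [(m : Int)] with hlstdef
    have hlstB : lst = occIdx nums (m + 1) x := by
      rw [hlstdef, hOcc x, occIdx_succ, if_pos hxg.symm]
    set leftB : Int := (if k < (lst.length : Int) then
        (if l < PySem.List.pyGetD lst ((lst.length : Int) - 1 - k) 0 + 1 then
          PySem.List.pyGetD lst ((lst.length : Int) - 1 - k) 0 + 1 else l)
      else l) with hleftB
    obtain ⟨hb1, hb2, hb3, hb4⟩ :=
      b_left_min nums k hk m hmlt l h0 hlm hG hMin x hxg lst hlstB leftB hleftB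
    have hEq : l' = leftB :=
      min_unique (GoodA nums k (m + 1)) l' leftB (by omega) (by omega) hG' hb3 hMinG hb4
    refine ⟨freq', occ.insert x lst, l', max best ((m : Int) - l' + 1), ?_, ?_,
      by omega, by push_cast at hl2 ⊢; omega, hA', hpos', hnod', ?_, hG', hMinG⟩
    · rw [hsplitA, List.foldl_append, hFA]
      simp only [List.foldl_cons, List.foldl_nil, aStep, hget]
      rw [hEA]
    · rw [hsplitB, List.foldl_append, hFB]
      simp only [List.foldl_cons, List.foldl_nil, bStep]
      rw [← hlstdef, ← hleftB, if_lt_eq_max, ← hEq]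
    · intro v
      rw [PySem.Dict.getD_insert]
      split
      · rename_i hv
        rw [hv]
        exact hlstB
      · rename_i hv
        rw [hOcc v, occIdx_succ, if_neg (fun h => hv (hxg.trans h).symm), List.append_nil]

-- for k ≤ 0 A's window always empties: the state after m iterations is (freq, m, 0)
theorem outer_nonpos (nums : List Int) (k : Int) (hk : k ≤ 0) :
    ∀ (m : Nat), m ≤ nums.length →
    ∃ freq : PySem.Dict Int Int,
      ((PySem.List.pyRange 0 (m : Int)).foldl (aStep nums k) (PySem.Dict.empty, 0, 0)) = (freq, (m : Int), 0) ∧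
      (∀ v, freq.getD v 0 = winCnt nums m (m : Int) v) ∧
      (∀ v, freq.contains v = true → freq.getD v 0 ≠ 0) ∧
      freq.keys.Nodup := by
  intro m
  induction m with
  | zero =>
    intro _
    refine ⟨PySem.Dict.empty, ?_, ?_, ?_, ?_⟩
    · simp [PySem.List.pyRange_zero_natCast]
    · intro v
      rw [winCnt_empty nums 0 (↑(0 : Nat)) (by omega) v, PySem.Dict.getD_empty]
    · intro v h
      rw [PySem.Dict.contains_empty] at h
      exact absurd h (by simp)
    · simpa using PySem.Dict.nodup_keys_empty (κ := Int) (ν := Int)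
  | succ m ihm =>
    intro hm1
    have hmlt : m < nums.length := by omega
    obtain ⟨freq, hFA, hA, hpos, hnod⟩ := ihm (by omega)
    have hsplitA : PySem.List.pyRange 0 ((m + 1 : Nat) : Int) =
        PySem.List.pyRange 0 (m : Int) ++ [(m : Int)] := by
      push_cast
      exact PySem.List.pyRange_one_succ_right (by positivity)
    set x : Int := nums[m]'hmlt with hx
    have hget : PySem.List.pyGetD nums (m : Int) 0 = x := by
      rw [PySem.List.pyGetD_eq_getElem nums 0 (by positivity) (by exact_mod_cast hmlt)]
      simp [hx]
    obtain ⟨hA1, hpos1, hnod1⟩ :=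
      a_add nums m hmlt (m : Int) (by positivity) (le_refl _) freq hA hpos hnod x hx
    obtain ⟨freq', l', hEA, hl1, hl2, hA', hpos', hnod', hG', hMin'⟩ :=
      aShrink_min nums k (m + 1) (by omega) (nums.length + 1) _ (m : Int)
        (by push_cast; omega) (by positivity) (by push_cast; omega) hA1 hpos1 hnod1
    have hl' : l' = ((m + 1 : Nat) : Int) := by
      by_contra hne
      have hlt : l' < ((m + 1 : Nat) : Int) := lt_of_le_of_ne hl2 hne
      have h0' : 0 ≤ l' := by omega
      have hhead := winCnt_head_pos nums (m + 1) l' h0' hlt (by omega)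
      have hgd := hG' (nums[l'.toNat]'(by push_cast at hlt; omega))
      rw [max_eq_right hk] at hgd
      omega
    refine ⟨freq', ?_, ?_, hpos', hnod'⟩
    · rw [hsplitA, List.foldl_append, hFA]
      simp only [List.foldl_cons, List.foldl_nil, aStep, hget]
      rw [hEA, hl']
      have hz : (m : Int) - ((m + 1 : Nat) : Int) + 1 = 0 := by push_cast; ring
      rw [hz]
      norm_num
    · intro v
      rw [hA' v, hl']

-- ===== VERDICT (by name: the statement is the Claim_ definition above) =====
theorem longestGoodSubarray_spec : Claim_equal_longestGoodSubarray := by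
  intro nums k _
  unfold Spec_longestGoodSubarray longestGoodSubarray longestGoodSubarray_alt
  by_cases hk : k ≤ 0
  · rw [if_pos hk]
    obtain ⟨freq, hFA, -, -, -⟩ := outer_nonpos nums k hk nums.length (le_refl _)
    rw [hFA]
  · rw [if_neg hk]
    obtain ⟨freq, occ, l, best, hFA, hFB, -⟩ :=
      outer_lockstep nums k (by omega) nums.length (le_refl _)
    rw [List.take_length] at hFB
    rw [hFA, hFB]
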